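-- pv_equiv track=rewrite | github.com/CallumHewitt/adventofcode | 2020/20/solution_1.py | count_matching_borders
-- ===== SOURCE A (Python) =====
-- from typing import OrderedDict
--
-- def count_matching_borders(borders_by_id):
--     counts_by_id = {}
--     for id, borders in borders_by_id.items():
--         counts_by_id[id]= OrderedDict(map(lambda border: (border, 0), borders))
--         for other_id, other_borders in borders_by_id.items():
--             if (id[0:-1] != other_id[0:-1]):
--                 for border in borders:
--                     if border in other_borders:
--                         counts_by_id[id][border] += 1
--     return counts_by_id
-- ===== SOURCE B (Python) =====
-- def count_matching_borders(borders_by_id):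
--     # Index pass: for each distinct border of each tile, count tiles containing it,
--     # overall and per id-prefix; then each tile's count is total minus same-prefix.
--     total = {}
--     by_prefix = {}
--     for id, borders in borders_by_id.items():
--         p = id[0:-1]
--         for border in dict.fromkeys(borders):
--             total[border] = total.get(border, 0) + 1
--             by_prefix[(p, border)] = by_prefix.get((p, border), 0) + 1
--     result = {}
--     for id, borders in borders_by_id.items():
--         p = id[0:-1]
--         counts = {}
--         for border in borders:
--             counts[border] = counts.get(border, 0) + (total[border] - by_prefix[(p, border)])
--         result[id] = counts
--     return result
-- ===== Notes on version B (the rewrite author's own statement) =====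
-- stated objective: faster
-- what changed: Replaces the all-pairs scan (for every tile, re-scan every other tile and test each border by a linear list search) with a one-pass index counting, per border, the tiles containing it overall and per id-prefix, so each tile's count is a constant-time subtraction total-minus-same-prefix.
import Mathlib
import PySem

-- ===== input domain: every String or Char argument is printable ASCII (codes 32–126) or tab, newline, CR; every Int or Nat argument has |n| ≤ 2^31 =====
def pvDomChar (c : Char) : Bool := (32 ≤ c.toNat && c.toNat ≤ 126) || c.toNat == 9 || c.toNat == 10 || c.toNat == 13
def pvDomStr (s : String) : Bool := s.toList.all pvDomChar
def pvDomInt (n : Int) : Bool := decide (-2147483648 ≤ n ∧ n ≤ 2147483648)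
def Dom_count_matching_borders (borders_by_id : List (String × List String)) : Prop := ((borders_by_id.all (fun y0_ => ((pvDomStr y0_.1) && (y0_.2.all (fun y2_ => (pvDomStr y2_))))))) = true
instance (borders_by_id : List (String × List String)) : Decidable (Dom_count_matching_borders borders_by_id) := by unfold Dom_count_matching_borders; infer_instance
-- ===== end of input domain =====

-- B replaces A's all-pairs scan by a one-pass border→tile-count index (total and per
-- id-prefix), making each tile's border count a subtraction; objective: faster.

-- id[0:-1]
def pvPref (s : String) : String := PySem.Str.slice s (some 0) (some (-1))

-- ===== PORT A =====
-- counts_by_id[id][border] += 1 is a get of counts_by_id[id] (always present: just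
-- inserted) followed by an in-place update of that inner dict, i.e. an overwrite of
-- the id entry with the inner dict whose border entry (always a key) is incremented.
def count_matching_borders (borders_by_id : List (String × List String)) : List (String × List (String × Int)) :=
  let items := (PySem.Dict.ofList borders_by_id).items
  let counts : PySem.Dict String (PySem.Dict String Int) :=
    items.foldl (fun counts it =>
      let counts := counts.insert it.1 (PySem.Dict.ofList (it.2.map (fun b => (b, (0 : Int)))))
      items.foldl (fun counts ot =>
        if pvPref it.1 ≠ pvPref ot.1 then
          it.2.foldl (fun counts b =>
            if b ∈ ot.2 then
              counts.insert it.1 ((counts.getD it.1 PySem.Dict.empty).insert b ((counts.getD it.1 PySem.Dict.empty).getD b 0 + 1))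
            else counts) counts
        else counts) counts) PySem.Dict.empty
  counts.items.map (fun p => (p.1, p.2.items))

-- ===== PORT B =====
def count_matching_borders_alt (borders_by_id : List (String × List String)) : List (String × List (String × Int)) :=
  let items := (PySem.Dict.ofList borders_by_id).items
  let tp : PySem.Dict String Int × PySem.Dict (String × String) Int :=
    items.foldl (fun tp it =>
      (PySem.Set.ofList it.2).foldl (fun tp b =>
        (tp.1.insert b (tp.1.getD b 0 + 1),
         tp.2.insert (pvPref it.1, b) (tp.2.getD (pvPref it.1, b) 0 + 1))) tp)
      (PySem.Dict.empty, PySem.Dict.empty)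
  let res : PySem.Dict String (List (String × Int)) :=
    items.foldl (fun res it =>
      let cnts : PySem.Dict String Int := it.2.foldl (fun c b =>
        c.insert b (c.getD b 0 + (tp.1.getD b 0 - tp.2.getD (pvPref it.1, b) 0))) PySem.Dict.empty
      res.insert it.1 cnts.items) PySem.Dict.empty
  res.items

-- ===== PRECONDITION & SPEC =====
def Spec_count_matching_borders (borders_by_id : List (String × List String)) (out : List (String × List (String × Int))) : Prop := out = count_matching_borders_alt borders_by_id
instance (borders_by_id : List (String × List String)) (out : List (String × List (String × Int))) : Decidable (Spec_count_matching_borders borders_by_id out) := by unfold Spec_count_matching_borders; infer_instance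

-- ===== CLAIM (what is proved, stated in full; the proofs are below) =====
def Claim_equal_count_matching_borders : Prop := ∀ (borders_by_id : List (String × List String)), Dom_count_matching_borders borders_by_id → Spec_count_matching_borders borders_by_id (count_matching_borders borders_by_id)

-- ===== LEMMAS AND PROOFS =====

-- A's inner increment step on a tile's own border-count dict, for one other tile ot.2
def pvInnStep (ob : List String) : PySem.Dict String Int → String → PySem.Dict String Int :=
  fun w b => if b ∈ ob then w.insert b (w.getD b 0 + 1) else w

-- A's whole double loop over the other tiles, acting on the inner dict only
def pvInnerLoop (itemsl : List (String × List String)) (id : String) (borders : List String)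
    (d : PySem.Dict String Int) : PySem.Dict String Int :=
  itemsl.foldl (fun w ot => if pvPref id ≠ pvPref ot.1 then borders.foldl (pvInnStep ot.2) w else w) d

def pvInner0 (borders : List String) : PySem.Dict String Int :=
  PySem.Dict.ofList (borders.map (fun b => (b, (0 : Int))))

def pvTotal (itemsl : List (String × List String)) : PySem.Dict String Int :=
  itemsl.foldl (fun t it => (PySem.Set.ofList it.2).foldl (fun t b => t.insert b (t.getD b 0 + 1)) t) PySem.Dict.empty

def pvByp (itemsl : List (String × List String)) : PySem.Dict (String × String) Int :=
  itemsl.foldl (fun t it => (PySem.Set.ofList it.2).foldl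
    (fun t b => t.insert (pvPref it.1, b) (t.getD (pvPref it.1, b) 0 + 1)) t) PySem.Dict.empty

-- a fold whose every step only rewrites the entry at key id localizes to the value
lemma pv_foldl_localize {κ ν γ : Type} [BEq κ] [LawfulBEq κ] (l : List γ)
    (f : PySem.Dict κ ν → γ → PySem.Dict κ ν) (g : ν → γ → ν) (id : κ)
    (h : ∀ (c : PySem.Dict κ ν) (w : ν) (a : γ), f (c.insert id w) a = c.insert id (g w a))
    (c : PySem.Dict κ ν) (v : ν) :
    l.foldl f (c.insert id v) = c.insert id (l.foldl g v) := by
  induction l generalizing v with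
  | nil => rfl
  | cons a t ih => simp only [List.foldl_cons, h, ih]

lemma pv_countP_split {α : Type} (l : List α) (p q : α → Bool) :
    l.countP q = l.countP (fun a => p a && q a) + l.countP (fun a => !p a && q a) := by
  induction l with
  | nil => simp
  | cons a t ih =>
    cases hp : p a <;> cases hq : q a <;> simp [hp, hq, ih] <;> omega

lemma pv_count_ofList (l : List String) (x : String) :
    (PySem.Set.ofList l).count x = if x ∈ l then 1 else 0 := by
  by_cases h : x ∈ l
  · have h1 := (List.nodup_iff_count_le_one.1 (PySem.Set.nodup_ofList l)) x
    have h2 : 0 < (PySem.Set.ofList l).count x :=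
      List.count_pos_iff.2 ((PySem.Set.mem_ofList l x).2 h)
    simp only [h, if_true]; omega
  · simp [h, List.count_eq_zero.2 (fun hm => h ((PySem.Set.mem_ofList l x).1 hm))]

lemma pvInnStep_getD (borders ob : List String) (d : PySem.Dict String Int) (x : String) :
    (borders.foldl (pvInnStep ob) d).getD x 0
      = d.getD x 0 + if x ∈ ob then (borders.count x : Int) else 0 := by
  induction borders generalizing d with
  | nil => simp
  | cons b t ih =>
    simp only [List.foldl_cons, pvInnStep]
    by_cases hb : b ∈ ob
    · by_cases hx : x = b
      · subst hx
        simp [hb, ih, PySem.Dict.getD_insert_self, List.count_cons]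
        ring
      · simp [hb, hx, ih, PySem.Dict.getD_insert, List.count_cons, Ne.symm hx]
    · by_cases hx : x = b
      · subst hx; simp [hb, ih, List.count_cons]
      · simp [hb, hx, ih, List.count_cons, Ne.symm hx]

lemma pvInnStep_keys (borders ob : List String) (d : PySem.Dict String Int)
    (h : ∀ b ∈ borders, b ∈ d.keys) :
    (borders.foldl (pvInnStep ob) d).keys = d.keys := by
  induction borders generalizing d with
  | nil => rfl
  | cons b t ih =>
    simp only [List.foldl_cons, pvInnStep]
    by_cases hb : b ∈ ob
    · have hc : d.contains b = true :=
        (PySem.Dict.contains_iff_mem_keys d b).2 (h b (List.mem_cons_self))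
      have hk : (d.insert b (d.getD b 0 + 1)).keys = d.keys :=
        PySem.Dict.keys_insert_of_contains d _ hc
      rw [if_pos hb, ih _ (fun b' hb' => by rw [hk]; exact h b' (List.mem_cons_of_mem _ hb')), hk]
    · rw [if_neg hb, ih _ (fun b' hb' => h b' (List.mem_cons_of_mem _ hb'))]

lemma pvInnerLoop_getD (itemsl : List (String × List String)) (id : String)
    (borders : List String) (d : PySem.Dict String Int) (x : String) :
    (pvInnerLoop itemsl id borders d).getD x 0
      = d.getD x 0 + (borders.count x : Int)
          * (itemsl.countP (fun ot => !decide (pvPref id = pvPref ot.1) && decide (x ∈ ot.2)) : Int) := by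
  induction itemsl generalizing d with
  | nil => simp [pvInnerLoop]
  | cons ot t ih =>
    have hcons : pvInnerLoop (ot :: t) id borders d
        = pvInnerLoop t id borders
            (if pvPref id ≠ pvPref ot.1 then borders.foldl (pvInnStep ot.2) d else d) := rfl
    rw [hcons, ih, List.countP_cons]
    by_cases hpr : pvPref id = pvPref ot.1
    · rw [if_neg (by simp [hpr])]
      simp [hpr]
    · rw [if_pos (by exact hpr), pvInnStep_getD]
      by_cases hm : x ∈ ot.2
      · simp only [if_pos hm]
        simp [hpr, hm]
        push_cast
        ring
      · simp [hpr, hm]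

lemma pvInnerLoop_keys (itemsl : List (String × List String)) (id : String)
    (borders : List String) (d : PySem.Dict String Int)
    (h : ∀ b ∈ borders, b ∈ d.keys) :
    (pvInnerLoop itemsl id borders d).keys = d.keys := by
  induction itemsl generalizing d with
  | nil => rfl
  | cons ot t ih =>
    have hcons : pvInnerLoop (ot :: t) id borders d
        = pvInnerLoop t id borders
            (if pvPref id ≠ pvPref ot.1 then borders.foldl (pvInnStep ot.2) d else d) := rfl
    rw [hcons]
    by_cases hpr : pvPref id = pvPref ot.1
    · rw [if_neg (by simp [hpr])]
      exact ih d h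
    · have hk := pvInnStep_keys borders ot.2 d h
      rw [if_pos (by exact hpr), ih _ (fun b hb => by rw [hk]; exact h b hb), hk]

lemma pv_foldl_insert_zero_getD (l : List (String × Int)) (d : PySem.Dict String Int)
    (h0 : ∀ p ∈ l, p.2 = 0) (hd : ∀ x, d.getD x 0 = 0) (x : String) :
    (l.foldl (fun d p => d.insert p.1 p.2) d).getD x 0 = 0 := by
  induction l generalizing d with
  | nil => exact hd x
  | cons p t ih =>
    simp only [List.foldl_cons]
    refine ih _ (fun q hq => h0 q (List.mem_cons_of_mem _ hq)) (fun y => ?_)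
    rw [PySem.Dict.getD_insert]
    split
    · exact h0 p (List.mem_cons_self)
    · exact hd y

lemma pvInner0_getD (borders : List String) (x : String) : (pvInner0 borders).getD x 0 = 0 := by
  refine pv_foldl_insert_zero_getD _ _ (fun p hp => ?_) (fun y => by simp) x
  rcases List.mem_map.1 hp with ⟨b, _, rfl⟩
  rfl

lemma pvInner0_keys (borders : List String) :
    (pvInner0 borders).keys = PySem.Set.ofList borders := by
  have h2 : (pvInner0 borders).keys
      = PySem.Set.update PySem.Dict.empty.keys ((borders.map (fun b => (b, (0 : Int)))).map (fun p => p.1)) :=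
    PySem.Dict.keys_foldl_insert_key (borders.map (fun b => (b, (0 : Int))))
      (fun p => p.1) (fun _ p => p.2) PySem.Dict.empty
  rw [h2]
  have hm : ((borders.map (fun b => (b, (0 : Int)))).map (fun p => p.1)) = borders := by simp [Function.comp_def]
  have hek : (PySem.Dict.empty : PySem.Dict String (PySem.Dict String Int)).keys = [] := rfl
  rw [hm]
  have hek2 : (PySem.Dict.empty : PySem.Dict String Int).keys = [] := rfl
  rw [hek2, PySem.Set.update_nil_left]

lemma pv_tp_inner (l : List String) (pp : String) (t : PySem.Dict String Int)
    (bp : PySem.Dict (String × String) Int) :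
    l.foldl (fun tp b => (tp.1.insert b (tp.1.getD b 0 + 1),
        tp.2.insert (pp, b) (tp.2.getD (pp, b) 0 + 1))) (t, bp)
      = (l.foldl (fun t b => t.insert b (t.getD b 0 + 1)) t,
         l.foldl (fun bp b => bp.insert (pp, b) (bp.getD (pp, b) 0 + 1)) bp) := by
  induction l generalizing t bp with
  | nil => rfl
  | cons b tl ih => simp only [List.foldl_cons, ih]

lemma pv_tp_outer (itemsl : List (String × List String)) (t : PySem.Dict String Int)
    (bp : PySem.Dict (String × String) Int) :
    itemsl.foldl (fun tp it => (PySem.Set.ofList it.2).foldl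
        (fun tp b => (tp.1.insert b (tp.1.getD b 0 + 1),
          tp.2.insert (pvPref it.1, b) (tp.2.getD (pvPref it.1, b) 0 + 1))) tp) (t, bp)
      = (itemsl.foldl (fun t it => (PySem.Set.ofList it.2).foldl
            (fun t b => t.insert b (t.getD b 0 + 1)) t) t,
         itemsl.foldl (fun bp it => (PySem.Set.ofList it.2).foldl
            (fun bp b => bp.insert (pvPref it.1, b) (bp.getD (pvPref it.1, b) 0 + 1)) bp) bp) := by
  induction itemsl generalizing t bp with
  | nil => rfl
  | cons it tl ih => simp only [List.foldl_cons, pv_tp_inner, ih]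

lemma pvTotal_getD (itemsl : List (String × List String)) (x : String) :
    (pvTotal itemsl).getD x 0 = (itemsl.countP (fun it => decide (x ∈ it.2)) : Int) := by
  suffices h : ∀ (d : PySem.Dict String Int),
      (itemsl.foldl (fun t it => (PySem.Set.ofList it.2).foldl
        (fun t b => t.insert b (t.getD b 0 + 1)) t) d).getD x 0
      = d.getD x 0 + (itemsl.countP (fun it => decide (x ∈ it.2)) : Int) by
    simpa [pvTotal] using h PySem.Dict.empty
  induction itemsl with
  | nil => simp
  | cons it tl ih =>
    intro d
    simp only [List.foldl_cons, ih, PySem.Dict.getD_foldl_insert_add_one, pv_count_ofList,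
      List.countP_cons]
    by_cases hm : x ∈ it.2 <;> simp [hm] <;> push_cast <;> ring

lemma pv_byp_step_getD (l : List String) (pp : String) (d : PySem.Dict (String × String) Int)
    (q x : String) :
    (l.foldl (fun d b => d.insert (pp, b) (d.getD (pp, b) 0 + 1)) d).getD (q, x) 0
      = d.getD (q, x) 0 + if q = pp then (l.count x : Int) else 0 := by
  induction l generalizing d with
  | nil => simp
  | cons b t ih =>
    simp only [List.foldl_cons, ih, PySem.Dict.getD_insert, List.count_cons]
    by_cases hq : q = pp
    · by_cases hx : x = b
      · subst hq; subst hx; simp; ring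
      · have : ((q, x) : String × String) ≠ (pp, b) := by simp [hx]
        simp [this, hx, Ne.symm hx]
    · have : ((q, x) : String × String) ≠ (pp, b) := by simp [hq]
      simp [this, hq]

lemma pvByp_getD (itemsl : List (String × List String)) (q x : String) :
    (pvByp itemsl).getD (q, x) 0
      = (itemsl.countP (fun it => decide (q = pvPref it.1) && decide (x ∈ it.2)) : Int) := by
  suffices h : ∀ (d : PySem.Dict (String × String) Int),
      (itemsl.foldl (fun t it => (PySem.Set.ofList it.2).foldl
        (fun t b => t.insert (pvPref it.1, b) (t.getD (pvPref it.1, b) 0 + 1)) t) d).getD (q, x) 0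
      = d.getD (q, x) 0 + (itemsl.countP (fun it => decide (q = pvPref it.1) && decide (x ∈ it.2)) : Int) by
    simpa [pvByp] using h PySem.Dict.empty
  induction itemsl with
  | nil => simp
  | cons it tl ih =>
    intro d
    simp only [List.foldl_cons, ih, pv_byp_step_getD, pv_count_ofList, List.countP_cons]
    by_cases hq : q = pvPref it.1 <;> by_cases hm : x ∈ it.2 <;>
      simp [hq, hm] <;> push_cast <;> ring

lemma pv_cnts_getD (l : List String) (m : String → Int) (d : PySem.Dict String Int) (x : String) :
    (l.foldl (fun c b => c.insert b (c.getD b 0 + m b)) d).getD x 0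
      = d.getD x 0 + (l.count x : Int) * m x := by
  induction l generalizing d with
  | nil => simp
  | cons b t ih =>
    simp only [List.foldl_cons, ih, PySem.Dict.getD_insert, List.count_cons]
    by_cases hx : x = b
    · subst hx; simp; push_cast; ring
    · simp [hx, Ne.symm hx]

lemma pv_cnts_keys (l : List String) (m : String → Int) :
    (l.foldl (fun c b => c.insert b (c.getD b 0 + m b)) PySem.Dict.empty).keys
      = PySem.Set.ofList l := by
  have h := PySem.Dict.keys_foldl_insert l (fun c b => c.getD b 0 + m b) PySem.Dict.empty
  simpa [PySem.Set.update_nil_left] using h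

-- the central counting identity: per tile and border, A's filtered count equals
-- B's total-minus-same-prefix difference
lemma pv_value_eq (itemsl : List (String × List String)) (id : String) (x : String)
    (borders : List String) :
    (borders.count x : Int)
        * (itemsl.countP (fun ot => !decide (pvPref id = pvPref ot.1) && decide (x ∈ ot.2)) : Int)
      = (borders.count x : Int)
        * ((pvTotal itemsl).getD x 0 - (pvByp itemsl).getD (pvPref id, x) 0) := by
  rw [pvTotal_getD, pvByp_getD]
  have h := pv_countP_split itemsl (fun ot => decide (pvPref id = pvPref ot.1))
    (fun ot => decide (x ∈ ot.2))
  have h2 : (itemsl.countP (fun it => decide (x ∈ it.2)) : Int)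
      - (itemsl.countP (fun it => decide (pvPref id = pvPref it.1) && decide (x ∈ it.2)) : Int)
      = (itemsl.countP (fun ot => !decide (pvPref id = pvPref ot.1) && decide (x ∈ ot.2)) : Int) := by
    rw [h]; push_cast; ring
  rw [← h2]

-- items of A's inner dict = items of B's counts dict, for each tile
lemma pv_inner_items_eq (itemsl : List (String × List String)) (id : String)
    (borders : List String) :
    (pvInnerLoop itemsl id borders (pvInner0 borders)).items
      = (borders.foldl (fun c b => c.insert b (c.getD b 0
            + ((pvTotal itemsl).getD b 0 - (pvByp itemsl).getD (pvPref id, b) 0)))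
          PySem.Dict.empty).items := by
  have hkA : (pvInnerLoop itemsl id borders (pvInner0 borders)).keys = PySem.Set.ofList borders := by
    rw [pvInnerLoop_keys, pvInner0_keys]
    intro b hb
    rw [pvInner0_keys]
    exact (PySem.Set.mem_ofList borders b).2 hb
  have hkB := pv_cnts_keys borders
    (fun b => (pvTotal itemsl).getD b 0 - (pvByp itemsl).getD (pvPref id, b) 0)
  rw [PySem.Dict.items_eq_map_keys _ (by rw [hkA]; exact PySem.Set.nodup_ofList borders) 0,
      PySem.Dict.items_eq_map_keys _ (by rw [hkB]; exact PySem.Set.nodup_ofList borders) 0,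
      hkA, hkB]
  refine List.map_congr_left (fun b _ => ?_)
  rw [pvInnerLoop_getD, pv_cnts_getD, pvInner0_getD]
  simp only [PySem.Dict.getD_empty, zero_add]
  exact congrArg (fun z => (b, z)) (pv_value_eq itemsl id b borders)

lemma pv_main (itemsl : List (String × List String))
    (hnd : (itemsl.map (fun p => p.1)).Nodup) :
    (itemsl.foldl (fun counts it =>
        itemsl.foldl (fun counts ot =>
          if pvPref it.1 ≠ pvPref ot.1 then
            it.2.foldl (fun counts b =>
              if b ∈ ot.2 then
                counts.insert it.1 ((counts.getD it.1 PySem.Dict.empty).insert b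
                  ((counts.getD it.1 PySem.Dict.empty).getD b 0 + 1))
              else counts) counts
          else counts) (counts.insert it.1 (PySem.Dict.ofList (it.2.map (fun b => (b, (0 : Int)))))))
        PySem.Dict.empty).items.map (fun p => (p.1, p.2.items))
    = (itemsl.foldl (fun res it =>
        res.insert it.1 ((it.2.foldl (fun c b => c.insert b (c.getD b 0
          + ((pvTotal itemsl).getD b 0 - (pvByp itemsl).getD (pvPref it.1, b) 0)))
          PySem.Dict.empty).items)) PySem.Dict.empty).items := by
  have hAfold : (itemsl.foldl (fun counts it =>
        itemsl.foldl (fun counts ot =>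
          if pvPref it.1 ≠ pvPref ot.1 then
            it.2.foldl (fun counts b =>
              if b ∈ ot.2 then
                counts.insert it.1 ((counts.getD it.1 PySem.Dict.empty).insert b
                  ((counts.getD it.1 PySem.Dict.empty).getD b 0 + 1))
              else counts) counts
          else counts) (counts.insert it.1 (PySem.Dict.ofList (it.2.map (fun b => (b, (0 : Int)))))))
        PySem.Dict.empty)
      = itemsl.foldl (fun counts it =>
          counts.insert it.1 (pvInnerLoop itemsl it.1 it.2 (pvInner0 it.2))) PySem.Dict.empty := by
    congr 1
    funext counts it
    refine pv_foldl_localize itemsl _ _ it.1 (fun c w ot => ?_) counts (pvInner0 it.2)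
    by_cases hpr : pvPref it.1 ≠ pvPref ot.1
    · rw [if_pos hpr, if_pos hpr]
      refine pv_foldl_localize it.2 _ _ it.1 (fun c' w' b => ?_) c w
      by_cases hb : b ∈ ot.2
      · simp [hb, pvInnStep, PySem.Dict.getD_insert_self, PySem.Dict.insert_insert_self]
      · simp [hb, pvInnStep]
    · rw [if_neg hpr, if_neg hpr]
  rw [hAfold]
  have hA : (itemsl.foldl (fun counts it =>
        counts.insert it.1 (pvInnerLoop itemsl it.1 it.2 (pvInner0 it.2))) PySem.Dict.empty).items
      = itemsl.map (fun it => (it.1, pvInnerLoop itemsl it.1 it.2 (pvInner0 it.2))) := by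
    simpa using PySem.Dict.items_foldl_insert_fresh itemsl (fun it => it.1)
      (fun it => pvInnerLoop itemsl it.1 it.2 (pvInner0 it.2)) PySem.Dict.empty
      (fun a _ => by simp) hnd
  have hB : (itemsl.foldl (fun res it =>
        res.insert it.1 ((it.2.foldl (fun c b => c.insert b (c.getD b 0
          + ((pvTotal itemsl).getD b 0 - (pvByp itemsl).getD (pvPref it.1, b) 0)))
          PySem.Dict.empty).items)) PySem.Dict.empty).items
      = itemsl.map (fun it => (it.1, (it.2.foldl (fun c b => c.insert b (c.getD b 0
          + ((pvTotal itemsl).getD b 0 - (pvByp itemsl).getD (pvPref it.1, b) 0)))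
          PySem.Dict.empty).items)) := by
    simpa using PySem.Dict.items_foldl_insert_fresh itemsl (fun it => it.1)
      (fun it => (it.2.foldl (fun c b => c.insert b (c.getD b 0
        + ((pvTotal itemsl).getD b 0 - (pvByp itemsl).getD (pvPref it.1, b) 0)))
        PySem.Dict.empty).items) PySem.Dict.empty
      (fun a _ => by simp) hnd
  rw [hA, hB, List.map_map]
  refine List.map_congr_left (fun it _ => ?_)
  exact congrArg (fun z => (it.1, z)) (pv_inner_items_eq itemsl it.1 it.2)

-- ===== VERDICT (by name: the statement is the Claim_ definition above) =====
theorem count_matching_borders_spec : Claim_equal_count_matching_borders := by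
  intro borders_by_id _
  have hnd : ((PySem.Dict.ofList borders_by_id).items.map (fun p => p.1)).Nodup := by
    have h := PySem.Dict.nodup_keys_ofList borders_by_id
    simpa [PySem.Dict.keys] using h
  have h := pv_main (PySem.Dict.ofList borders_by_id).items hnd
  show count_matching_borders borders_by_id = count_matching_borders_alt borders_by_id
  simp only [count_matching_borders, count_matching_borders_alt]
  rw [pv_tp_outer]
  exact h
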